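-- pv_equiv track=rewrite | github.com/Dejavu666/pokerThief | hands.py | three_of_a_kind_finder
-- ===== SOURCE A (Python) =====
-- def three_of_a_kind_finder(hand):
--     ranks = [card[0] for card in hand]
--     threes = []
--     highcards = []
--     for rank in ranks:
--         if ranks.count(rank) == 3:
--             threes.append(rank)
--         else:
--             highcards.append(rank)
--     highcards.sort(reverse=True)
--     if len(threes) >= 1:
--         return [max(threes)]+highcards
--     return None
-- ===== SOURCE B (Python) =====
-- def _scan(s):
--     # s is sorted in descending order; returns (rank of the first (= highest)
--     # run of exactly three equal ranks, or None, and all ranks not in a run of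
--     # three, in order -- which is already descending).
--     if not s:
--         return None, []
--     r = s[0]
--     k = 1
--     while k < len(s) and s[k] == r:
--         k += 1
--     triple, high = _scan(s[k:])
--     if k == 3:
--         return r, high
--     return triple, s[:k] + high
--
--
-- def three_of_a_kind_finder(hand):
--     ranks = sorted((card[0] for card in hand), reverse=True)
--     triple, highcards = _scan(ranks)
--     if triple is None:
--         return None
--     return [triple] + highcards
-- ===== Notes on version B (the rewrite author's own statement) =====
-- stated objective: faster
-- what changed: Replaces A's per-card ranks.count scans plus a separate sort of the high cards with sort-first-then-scan: sort all ranks descending once, then a single recursive pass over maximal runs of equal ranks, where the first run of length exactly 3 is the triple and all other runs are the (already descending) high cards.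
import Mathlib
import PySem

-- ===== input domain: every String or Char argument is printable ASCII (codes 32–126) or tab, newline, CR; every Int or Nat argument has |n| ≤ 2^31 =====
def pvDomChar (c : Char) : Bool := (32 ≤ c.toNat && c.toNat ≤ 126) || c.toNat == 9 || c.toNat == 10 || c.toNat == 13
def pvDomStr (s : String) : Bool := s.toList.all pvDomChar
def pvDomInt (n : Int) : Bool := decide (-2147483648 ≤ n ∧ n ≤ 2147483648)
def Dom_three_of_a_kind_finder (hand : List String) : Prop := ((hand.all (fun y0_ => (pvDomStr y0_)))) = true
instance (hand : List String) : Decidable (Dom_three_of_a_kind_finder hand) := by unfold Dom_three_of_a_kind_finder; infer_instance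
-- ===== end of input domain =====

-- B sorts all ranks descending once and makes one recursive pass over maximal runs of
-- equal ranks (first run of length exactly 3 = the triple; the other runs, in order,
-- are the already-descending high cards), instead of A's per-card ranks.count scans
-- plus a separate sort of the high cards.

-- ===== PORT A =====
-- card[0] as a one-character string (none = IndexError on the empty string)
def pvRank? (card : String) : Option String :=
  (PySem.Str.pyGet? card 0).map (fun c => String.ofList [c])

def three_of_a_kind_finder (hand : List String) : Option (List String) :=
  match hand.mapM pvRank? with
  | none => none   -- IndexError: card[0] on an empty string; excluded by Pre_
  | some ranks =>
    let tp := ranks.foldl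
      (fun (acc : List String × List String) rank =>
        if ranks.count rank == 3 then (acc.1 ++ [rank], acc.2) else (acc.1, acc.2 ++ [rank]))
      ([], [])
    let highcards := PySem.List.sorted tp.2 (fun x => x) true
    if tp.1.length ≥ 1 then
      match PySem.List.max? tp.1 (fun x => x) with
      | some m => some (m :: highcards)
      | none => none
    else none

-- ===== PORT B =====
-- _scan from Source B: the inner `while` counts the run of s[0], ported exactly as
-- takeWhile/dropWhile (s[:k] = r :: run prefix, s[k:] = remainder after the run).
def pvScan : List String → Option String × List String
  | [] => (none, [])
  | r :: rest =>
    let k := 1 + (rest.takeWhile (fun x => x == r)).length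
    let p := pvScan (rest.dropWhile (fun x => x == r))
    if k == 3 then (some r, p.2)
    else (p.1, (r :: rest.takeWhile (fun x => x == r)) ++ p.2)
termination_by s => s.length
decreasing_by
  exact Nat.lt_succ_of_le (List.length_dropWhile_le _ _)

def three_of_a_kind_finder_alt (hand : List String) : Option (List String) :=
  match hand.mapM pvRank? with
  | none => none   -- IndexError: card[0] on an empty string; excluded by Pre_
  | some rs =>
    let ranks := PySem.List.sorted rs (fun x => x) true
    let p := pvScan ranks
    match p.1 with
    | none => none
    | some t => some (t :: p.2)

-- ===== PRECONDITION & SPEC =====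
-- Pre_ excludes hands containing an empty string, on which A's card[0] raises IndexError.
def Pre_three_of_a_kind_finder (hand : List String) : Prop := ∀ card ∈ hand, card ≠ ""
instance (hand : List String) : Decidable (Pre_three_of_a_kind_finder hand) := by
  unfold Pre_three_of_a_kind_finder; infer_instance
def pvWitness_three_of_a_kind_finder : List String := ["3h", "3d", "3s", "Ah", "2c"]

def Spec_three_of_a_kind_finder (hand : List String) (out : Option (List String)) : Prop := out = three_of_a_kind_finder_alt hand
instance (hand : List String) (out : Option (List String)) : Decidable (Spec_three_of_a_kind_finder hand out) := by unfold Spec_three_of_a_kind_finder; infer_instance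

-- ===== CLAIM (what is proved, stated in full; the proofs are below) =====
def Claim_equal_three_of_a_kind_finder : Prop := ∀ (hand : List String), Dom_three_of_a_kind_finder hand → Pre_three_of_a_kind_finder hand → Spec_three_of_a_kind_finder hand (three_of_a_kind_finder hand)

-- ===== LEMMAS AND PROOFS =====

-- A's append-to-one-of-two-lists loop is a partition into (filter p, filter ¬p).
theorem pv_foldl_partition (p : String → Bool) (l : List String) (t h : List String) :
    l.foldl (fun (acc : List String × List String) rank =>
        if p rank then (acc.1 ++ [rank], acc.2) else (acc.1, acc.2 ++ [rank])) (t, h)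
      = (t ++ l.filter p, h ++ l.filter (fun r => !p r)) := by
  induction l generalizing t h with
  | nil => simp
  | cons x xs ih =>
    by_cases hx : p x <;> simp [hx, ih, List.append_assoc]

-- a reverse-sorted list is determined by its multiset and the pairwise-descending property
theorem pv_sorted_rev_unique (xs ys : List String) (h : ys.Perm xs)
    (hp : ys.Pairwise (fun a b => b ≤ a)) :
    PySem.List.sorted xs (fun x => x) true = ys := by
  apply PySem.List.eq_of_perm_of_pairwise_le_of_injective
      (fun x : String => OrderDual.toDual x) (fun a b hab => hab)
  · exact (PySem.List.sorted_perm xs _ true).trans h.symm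
  · exact PySem.List.sorted_pairwise_rev xs (fun x => x)
  · exact hp

-- the head of a non-empty dropWhile fails the predicate
theorem pv_dropWhile_cons (p : String → Bool) (l : List String) (d : String)
    (t : List String) (h : l.dropWhile p = d :: t) : p d = false := by
  induction l generalizing d t with
  | nil => simp at h
  | cons x xs ih =>
    by_cases hx : p x
    · rw [List.dropWhile_cons, if_pos hx] at h
      exact ih d t h
    · rw [List.dropWhile_cons, if_neg hx] at h
      cases h
      simpa using hx

-- the scan of Source B, on a descending list, picks out head? of the count-3 ranks and
-- keeps exactly the ranks whose count is not 3
theorem pvScan_spec (s : List String) (hp : s.Pairwise (fun a b => b ≤ a)) :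
    pvScan s = ((s.filter (fun r => s.count r == 3)).head?,
                s.filter (fun r => !(s.count r == 3))) := by
  induction hn : s.length using Nat.strong_induction_on generalizing s with
  | _ n ih =>
  cases s with
  | nil => simp [pvScan]
  | cons r rest =>
    have hdesc : rest.Pairwise (fun a b => b ≤ a) := (List.pairwise_cons.mp hp).2
    have hrle : ∀ x ∈ rest, x ≤ r := (List.pairwise_cons.mp hp).1
    set tw := rest.takeWhile (fun x => x == r) with htw
    set dw := rest.dropWhile (fun x => x == r) with hdw
    have hsplit : rest = tw ++ dw := (List.takeWhile_append_dropWhile).symm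
    have htw_eq : ∀ x ∈ tw, x = r := by
      intro x hx
      have := List.mem_takeWhile_imp hx
      simpa using this
    have hdw_ne : ∀ x ∈ dw, x ≠ r := by
      cases hdwc : dw with
      | nil => simp
      | cons d dtl =>
        have hd_ne' : d ≠ r := by
          have := pv_dropWhile_cons (fun x : String => x == r) rest d dtl (by rw [← hdw, hdwc])
          simpa using this
        have hd_mem : d ∈ rest := by
          rw [hsplit, hdwc]; simp
        have hd_lt : d < r := lt_of_le_of_ne (hrle d hd_mem) hd_ne'
        have hdw_pair : (d :: dtl).Pairwise (fun a b => b ≤ a) := by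
          rw [← hdwc, hdw]
          exact hdesc.sublist (List.dropWhile_sublist _)
        intro x hx
        rcases List.mem_cons.mp hx with h | h
        · subst h; exact hd_ne'
        · have : x ≤ d := (List.pairwise_cons.mp hdw_pair).1 x h
          exact ne_of_lt (lt_of_le_of_lt this hd_lt)
    set k := 1 + tw.length with hk
    -- counts in s = r :: tw ++ dw
    have hcount_r : (r :: rest).count r = k := by
      rw [hsplit, hk]
      have h1 : tw.count r = tw.length := by
        rw [List.count_eq_length]
        intro x hx; rw [htw_eq x hx]
      have h2 : dw.count r = 0 := by
        rw [List.count_eq_zero]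
        intro hmem; exact hdw_ne r hmem rfl
      simp [h1, h2, Nat.add_comm]
    have hcount_ne : ∀ x, x ≠ r → (r :: rest).count x = dw.count x := by
      intro x hx
      rw [hsplit]
      have h1 : tw.count x = 0 := by
        rw [List.count_eq_zero]
        intro hmem; exact hx (htw_eq x hmem)
      simp [h1, Ne.symm hx]
    -- the filters over s split into the r-block and the dw part
    have hfilter : ∀ b : Bool,
        (r :: rest).filter (fun x => ((r :: rest).count x == 3) == b)
          = ((r :: tw).filter (fun _ => (k == 3) == b))
            ++ dw.filter (fun x => (dw.count x == 3) == b) := by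
      intro b
      rw [hsplit]
      have : (r :: (tw ++ dw)) = (r :: tw) ++ dw := by simp
      rw [this, List.filter_append]
      congr 1
      · apply List.filter_congr
        intro x hx
        have hxr : x = r := by
          rcases List.mem_cons.mp hx with h | h
          · exact h
          · exact htw_eq x h
        subst hxr
        rw [show ((x :: tw) ++ dw) = x :: rest by rw [hsplit]; simp, hcount_r]
      · apply List.filter_congr
        intro x hx
        rw [show ((r :: tw) ++ dw) = r :: rest by rw [hsplit]; simp,
          hcount_ne x (hdw_ne x hx)]
    have hdw_pair : dw.Pairwise (fun a b => b ≤ a) :=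
      hdesc.sublist (List.dropWhile_sublist _)
    have hdw_len : dw.length < n := by
      have h1 : dw.length ≤ rest.length := List.length_dropWhile_le _ _
      have h2 : rest.length < (r :: rest).length := by simp
      omega
    have hih := ih dw.length hdw_len dw hdw_pair rfl
    -- unfold one step of pvScan
    rw [pvScan]
    simp only [← htw, ← hdw, ← hk, hih]
    have hf3 := hfilter true
    have hfn := hfilter false
    simp only [beq_true, beq_false] at hf3 hfn
    by_cases hk3 : k = 3
    · have hkb : (k == 3) = true := by simp [hk3]
      rw [if_pos hkb]
      rw [hf3, hfn]
      simp [hkb]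
    · have hkb : (k == 3) = false := by simp [hk3]
      rw [if_neg (by simp [hk3])]
      rw [hf3, hfn]
      simp [hkb]

-- head of the descending sort = Python's max (first extremal element)
theorem pv_head_sorted_rev_eq_max (l : List String) :
    (PySem.List.sorted l (fun x => x) true).head? = PySem.List.max? l (fun x => x) := by
  cases hm : PySem.List.max? l (fun x => x) with
  | none =>
    have : l = [] := (PySem.List.max?_eq_none_iff _ _).mp hm
    subst this
    have : PySem.List.sorted ([] : List String) (fun x => x) true = [] :=
      List.Perm.eq_nil (PySem.List.sorted_perm [] _ true)
    rw [this]; rfl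
  | some m =>
    have hmax := PySem.List.max?_isMax hm
    have hmem : m ∈ l := PySem.List.max?_mem hm
    cases hs : PySem.List.sorted l (fun x => x) true with
    | nil =>
      exfalso
      have : l = [] := List.Perm.eq_nil ((PySem.List.sorted_perm l _ true).symm.trans
        (by rw [hs]))
      subst this; simp at hmem
    | cons h t =>
      have hperm : (h :: t).Perm l := by rw [← hs]; exact PySem.List.sorted_perm l _ true
      have hpair : (h :: t).Pairwise (fun a b => b ≤ a) := by
        rw [← hs]; exact PySem.List.sorted_pairwise_rev l (fun x => x)
      have hh_mem : h ∈ l := hperm.mem_iff.mp (by simp)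
      have hm_mem : m ∈ h :: t := hperm.mem_iff.mpr hmem
      have h1 : h ≤ m := hmax h hh_mem
      have h2 : m ≤ h := by
        rcases List.mem_cons.mp hm_mem with h' | h'
        · exact le_of_eq h'
        · exact (List.pairwise_cons.mp hpair).1 m h'
      simp [le_antisymm h2 h1]

-- the core equality, for an arbitrary list of ranks
theorem pv_core (ranks : List String) :
    (let tp := ranks.foldl
      (fun (acc : List String × List String) rank =>
        if ranks.count rank == 3 then (acc.1 ++ [rank], acc.2) else (acc.1, acc.2 ++ [rank]))
      ([], [])
     let highcards := PySem.List.sorted tp.2 (fun x => x) true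
     if tp.1.length ≥ 1 then
       match PySem.List.max? tp.1 (fun x => x) with
       | some m => some (m :: highcards)
       | none => none
     else none)
    =
    (let s := PySem.List.sorted ranks (fun x => x) true
     let p := pvScan s
     match p.1 with
     | none => none
     | some t => some (t :: p.2)) := by
  simp only
  rw [pv_foldl_partition]
  simp only [List.nil_append]
  set s := PySem.List.sorted ranks (fun x => x) true with hs
  have hperm : s.Perm ranks := PySem.List.sorted_perm ranks _ true
  have hpair : s.Pairwise (fun a b => b ≤ a) := PySem.List.sorted_pairwise_rev ranks _
  rw [pvScan_spec s hpair]
  -- counts inside s are counts inside ranks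
  have h3 : s.filter (fun r => s.count r == 3) = s.filter (fun r => ranks.count r == 3) :=
    List.filter_congr (fun x _ => by rw [hperm.count_eq])
  have hn3 : s.filter (fun r => !(s.count r == 3))
      = s.filter (fun r => !(ranks.count r == 3)) :=
    List.filter_congr (fun x _ => by rw [hperm.count_eq])
  -- filtering the sorted list = sorting the filtered list
  have hfs : ∀ q : String → Bool, s.filter q = PySem.List.sorted (ranks.filter q) (fun x => x) true := by
    intro q
    exact (pv_sorted_rev_unique (ranks.filter q) (s.filter q) (hperm.filter q)
      (hpair.sublist List.filter_sublist)).symm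
  set threes := ranks.filter (fun r => ranks.count r == 3) with hthrees
  have hhead : (s.filter (fun r => s.count r == 3)).head?
      = PySem.List.max? threes (fun x => x) := by
    rw [h3, hfs, pv_head_sorted_rev_eq_max]
  have hhigh : s.filter (fun r => !(s.count r == 3))
      = PySem.List.sorted (ranks.filter (fun r => !(ranks.count r == 3))) (fun x => x) true := by
    rw [hn3, hfs]
  simp only [hhead, hhigh]
  cases hm : PySem.List.max? threes (fun x => x) with
  | none =>
    have : threes = [] := (PySem.List.max?_eq_none_iff _ _).mp hm
    rw [this]
    simp
  | some m =>
    have hne : threes ≠ [] := by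
      intro h
      rw [h] at hm
      exact absurd ((PySem.List.max?_eq_none_iff ([] : List String) (fun x => x)).mpr rfl)
        (by rw [hm]; simp)
    have hlen : threes.length ≥ 1 := by
      have := List.length_pos_of_ne_nil hne
      omega
    rw [if_pos hlen]

-- ===== VERDICT (by name: the statement is the Claim_ definition above) =====
theorem three_of_a_kind_finder_spec : Claim_equal_three_of_a_kind_finder := by
  intro hand _ _
  unfold Spec_three_of_a_kind_finder three_of_a_kind_finder three_of_a_kind_finder_alt
  cases h : hand.mapM pvRank? with
  | none => rfl
  | some ranks => exact pv_core ranks
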